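-- pv_equiv track=rewrite | github.com/Tragoedie/on_server_learning | 28_tasks/SynchronizingTables.py | SynchronizingTables
-- ===== SOURCE A (Python) =====
-- def SynchronizingTables(N, ids, salary):
--     ids_copy = ids.copy()
--     salary_copy = salary.copy()
--     x_change = True
--     while x_change:
--         x_change = False
--         for i in range(N - 1):
--             if ids_copy[i] > ids_copy[i + 1]:
--                 ids_copy[i], ids_copy[i + 1] = ids_copy[i + 1], ids_copy[i]
--                 x_change = True
--     y_change = True
--     while y_change:
--         y_change = False
--         for j in range(N - 1):
--             if salary_copy[j] > salary_copy[j + 1]: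
--                 salary_copy[j], salary_copy[j + 1] = salary_copy[j + 1], salary_copy[j]
--                 y_change = True
--     for x in range(N):
--         for y in range(N):
--             if ids_copy[x] == ids[y]:
--                 salary[y] = salary_copy[x]
--     return salary
-- ===== SOURCE B (Python) =====
-- def SynchronizingTables(N, ids, salary):
--     # Sort the first-N prefixes once, map each id to the last position of its
--     # value in the sorted prefix, and assign salaries by rank in one pass.
--     # Returns a new list (A mutates `salary` in place; return value is identical).
--     sid = sorted(ids[:N])
--     ssal = sorted(salary[:N])
--     rank = {}
--     for i, v in enumerate(sid):
--         rank[v] = i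
--     out = list(salary)
--     for y in range(N):
--         out[y] = ssal[rank[ids[y]]]
--     return out
-- ===== Notes on version B (the rewrite author's own statement) =====
-- stated objective: faster
-- what changed: Replaces the two bubble sorts and the quadratic id-matching double loop by two sorted() calls plus a dict mapping each id value to its last position in the sorted prefix, assigning all salaries in one linear pass; B returns a fresh list instead of mutating salary in place (same return value).
import Mathlib
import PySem

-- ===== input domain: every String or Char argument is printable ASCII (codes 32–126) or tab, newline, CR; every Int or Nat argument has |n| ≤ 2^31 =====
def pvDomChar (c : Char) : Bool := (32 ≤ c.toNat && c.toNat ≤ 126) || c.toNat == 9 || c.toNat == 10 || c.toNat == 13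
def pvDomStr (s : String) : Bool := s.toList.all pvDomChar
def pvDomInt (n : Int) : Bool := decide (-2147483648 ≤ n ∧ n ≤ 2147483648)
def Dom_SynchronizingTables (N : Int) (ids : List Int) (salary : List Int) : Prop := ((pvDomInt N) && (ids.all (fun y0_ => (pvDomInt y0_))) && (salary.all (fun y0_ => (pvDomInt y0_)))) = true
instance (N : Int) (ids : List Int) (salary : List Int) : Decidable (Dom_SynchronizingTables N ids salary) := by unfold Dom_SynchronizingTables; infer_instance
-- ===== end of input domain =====

-- B replaces A's bubble sorts + quadratic matching loop by sorted prefixes and a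
-- value→last-sorted-position dict (O(n log n) vs O(n^2)); A mutates `salary` in
-- place, B returns a fresh list — the proved equivalence is about the return value.

-- ===== PORT A =====
-- one sweep of Python's `for i in range(N-1): if l[i] > l[i+1]: swap` (k = number
-- of comparisons); the structural recursion carries the running element exactly
-- like the index-based adjacent swaps do
def pvSweepA : Nat → List Int → List Int × Bool
  | k+1, a :: b :: t =>
    if a > b then
      let r := pvSweepA k (a :: t)
      (b :: r.1, true)
    else
      let r := pvSweepA k (b :: t)
      (a :: r.1, r.2)
  | _, l => (l, false)

-- inversion count: termination measure for the `while x_change` loop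
def pvInv : List Int → Nat
  | [] => 0
  | a :: t => t.countP (fun b => decide (b < a)) + pvInv t

theorem pvSweepA_perm (k : Nat) (l : List Int) : ((pvSweepA k l).1).Perm l := by
  induction k generalizing l with
  | zero => simp [pvSweepA]
  | succ k ih =>
    match l with
    | [] => simp [pvSweepA]
    | [a] => simp [pvSweepA]
    | a :: b :: t =>
      by_cases h : a > b
      · simp only [pvSweepA, if_pos h]
        exact ((ih (a :: t)).cons b).trans (List.Perm.swap a b t)
      · simp only [pvSweepA, if_neg h]
        exact (ih (b :: t)).cons a

theorem pvSweepA_inv (k : Nat) (l : List Int) :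
    pvInv (pvSweepA k l).1 ≤ pvInv l ∧ ((pvSweepA k l).2 = true → pvInv (pvSweepA k l).1 < pvInv l) := by
  induction k generalizing l with
  | zero => simp [pvSweepA]
  | succ k ih =>
    match l with
    | [] => simp [pvSweepA]
    | [a] => simp [pvSweepA]
    | a :: b :: t =>
      by_cases h : a > b
      · have h1 := (ih (a :: t)).1
        simp only [pvSweepA, if_pos h]
        have e1 : pvInv (b :: (pvSweepA k (a :: t)).1)
            = List.countP (fun x => decide (x < b)) (pvSweepA k (a :: t)).1
              + pvInv (pvSweepA k (a :: t)).1 := rfl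
        have e2 : List.countP (fun x => decide (x < b)) (pvSweepA k (a :: t)).1
            = List.countP (fun x => decide (x < b)) t := by
          rw [(pvSweepA_perm k (a :: t)).countP_eq, List.countP_cons]
          simp [show ¬ (a < b) from by omega]
        have e3 : pvInv (a :: t) = List.countP (fun x => decide (x < a)) t + pvInv t := rfl
        have e4 : pvInv (a :: b :: t)
            = List.countP (fun x => decide (x < a)) (b :: t) + pvInv (b :: t) := rfl
        have e5 : List.countP (fun x => decide (x < a)) (b :: t)
            = List.countP (fun x => decide (x < a)) t + 1 := by
          rw [List.countP_cons]
          simp [show b < a from h]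
        have e6 : pvInv (b :: t) = List.countP (fun x => decide (x < b)) t + pvInv t := rfl
        rw [e3] at h1
        refine ⟨?_, fun _ => ?_⟩
        · rw [e1, e2, e4, e5, e6]; omega
        · rw [e1, e2, e4, e5, e6]; omega
      · have h1 := ih (b :: t)
        have hcnt : ((pvSweepA k (b :: t)).1).countP (fun x => decide (x < a))
            = (b :: t).countP (fun x => decide (x < a)) :=
          (pvSweepA_perm k (b :: t)).countP_eq _
        simp only [pvSweepA, if_neg h, pvInv, List.countP_cons] at *
        constructor
        · omega
        · intro hc
          have := h1.2 hc
          omega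

-- Python's `while x_change:` loop
def pvBubbleA (k : Nat) (l : List Int) : List Int :=
  if h : (pvSweepA k l).2 = true then pvBubbleA k (pvSweepA k l).1 else (pvSweepA k l).1

termination_by pvInv l
decreasing_by exact (pvSweepA_inv k l).2 h

def SynchronizingTables (N : Int) (ids : List Int) (salary : List Int) : List Int :=
  let idsC := pvBubbleA (N - 1).toNat ids
  let salC := pvBubbleA (N - 1).toNat salary
  (PySem.List.pyRange 0 N 1).foldl (fun sal x =>
    (PySem.List.pyRange 0 N 1).foldl (fun sal y =>
      if PySem.List.pyGetD idsC x 0 = PySem.List.pyGetD ids y 0 then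
        PySem.List.pySetD sal y (PySem.List.pyGetD salC x 0)
      else sal) sal) salary

-- ===== PORT B =====
def SynchronizingTables_alt (N : Int) (ids : List Int) (salary : List Int) : List Int :=
  let sid := PySem.List.sorted (PySem.List.slice ids none (some N)) (fun x => x) false
  let ssal := PySem.List.sorted (PySem.List.slice salary none (some N)) (fun x => x) false
  let rank := (PySem.List.enumerate sid 0).foldl (fun d p => d.insert p.2 p.1) PySem.Dict.empty
  (PySem.List.pyRange 0 N 1).foldl (fun out y =>
    PySem.List.pySetD out y
      (PySem.List.pyGetD ssal (rank.getD (PySem.List.pyGetD ids y 0) 0) 0)) salary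

-- ===== PRECONDITION & SPEC =====
-- exactly the inputs on which A returns normally: the bubble sorts and the
-- assignment loops index positions 0..N-1 of both lists (IndexError otherwise)
def Pre_SynchronizingTables (N : Int) (ids : List Int) (salary : List Int) : Prop :=
  N ≤ (ids.length : Int) ∧ N ≤ (salary.length : Int)
instance (N : Int) (ids : List Int) (salary : List Int) : Decidable (Pre_SynchronizingTables N ids salary) := by unfold Pre_SynchronizingTables; infer_instance

def pvWitness_SynchronizingTables : Int × List Int × List Int := (3, [3, 1, 2], [30, 10, 20])

def Spec_SynchronizingTables (N : Int) (ids : List Int) (salary : List Int) (out : List Int) : Prop := out = SynchronizingTables_alt N ids salary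
instance (N : Int) (ids : List Int) (salary : List Int) (out : List Int) : Decidable (Spec_SynchronizingTables N ids salary out) := by unfold Spec_SynchronizingTables; infer_instance

-- ===== CLAIM (what is proved, stated in full; the proofs are below) =====
def Claim_equal_SynchronizingTables : Prop := ∀ (N : Int) (ids : List Int) (salary : List Int), Dom_SynchronizingTables N ids salary → Pre_SynchronizingTables N ids salary → Spec_SynchronizingTables N ids salary (SynchronizingTables N ids salary)

-- ===== LEMMAS AND PROOFS =====

theorem pvSweepA_false_eq (k : Nat) (l : List Int) (h : (pvSweepA k l).2 = false) :
    (pvSweepA k l).1 = l := by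
  induction k generalizing l with
  | zero => simp [pvSweepA]
  | succ k ih =>
    match l with
    | [] => simp [pvSweepA]
    | [a] => simp [pvSweepA]
    | a :: b :: t =>
      by_cases hab : a > b
      · simp only [pvSweepA, if_pos hab] at h
        simp at h
      · simp only [pvSweepA, if_neg hab] at h ⊢
        rw [ih (b :: t) h]

theorem pvSweepA_false_sorted (k : Nat) (l : List Int) (h : (pvSweepA k l).2 = false)
    (hl : l.length ≤ k + 1) : l.Pairwise (· ≤ ·) := by
  induction k generalizing l with
  | zero =>
    match l with
    | [] => simp
    | [a] => simp
    | a :: b :: t => simp at hl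
  | succ k ih =>
    match l with
    | [] => simp
    | [a] => simp
    | a :: b :: t =>
      by_cases hab : a > b
      · simp only [pvSweepA, if_pos hab] at h
        simp at h
      · simp only [pvSweepA, if_neg hab] at h
        have hs : (b :: t).Pairwise (· ≤ ·) := by
          apply ih (b :: t) h
          simp at hl ⊢
          omega
        rw [List.pairwise_cons]
        refine ⟨?_, hs⟩
        intro x hx
        rcases List.mem_cons.mp hx with rfl | hx'
        · omega
        · have := (List.pairwise_cons.mp hs).1 x hx'
          omega

theorem pvSweepA_split (k : Nat) (p s : List Int) (hp : p.length = k + 1) :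
    pvSweepA k (p ++ s) = ((pvSweepA k p).1 ++ s, (pvSweepA k p).2) := by
  induction k generalizing p s with
  | zero =>
    match p with
    | [a] => simp [pvSweepA]
    | [] => simp at hp
    | a :: b :: t => simp at hp
  | succ k ih =>
    match p with
    | [] => simp at hp
    | [a] => simp at hp
    | a :: b :: t =>
      have ht : t.length = k - 1 + 1 ∨ k = 0 := by simp at hp; omega
      by_cases hab : a > b
      · have h1 := ih (a :: t) s (by simp at hp ⊢; omega)
        simp only [List.cons_append, pvSweepA, if_pos hab] at *
        rw [h1]
      · have h1 := ih (b :: t) s (by simp at hp ⊢; omega)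
        simp only [List.cons_append, pvSweepA, if_neg hab] at *
        rw [h1]

theorem pvBubbleA_split (m : Nat) (k : Nat) (p s : List Int) (hm : pvInv p = m)
    (hp : p.length = k + 1) :
    pvBubbleA k (p ++ s) = PySem.List.sorted p (fun x => x) false ++ s := by
  induction m using Nat.strong_induction_on generalizing p with
  | _ m ihm =>
    rw [pvBubbleA]
    rw [pvSweepA_split k p s hp]
    by_cases hf : (pvSweepA k p).2 = true
    · simp only [hf, dif_pos]
      have hperm := pvSweepA_perm k p
      have hlen : ((pvSweepA k p).1).length = k + 1 := by rw [hperm.length_eq, hp]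
      have hinv : pvInv (pvSweepA k p).1 < m := by
        rw [← hm]; exact (pvSweepA_inv k p).2 hf
      rw [ihm _ hinv (pvSweepA k p).1 rfl hlen]
      congr 1
      exact PySem.List.sorted_eq_sorted_of_perm _ _ _ (fun a b h => h) hperm
    · simp only [hf]
      simp only [Bool.false_eq_true, dite_false]
      rw [pvSweepA_false_eq k p (by simpa using hf)]
      rw [PySem.List.sorted_eq_self_of_pairwise]
      exact pvSweepA_false_sorted k p (by simpa using hf) (by omega)

theorem pvFoldLen {α β : Type} (l : List β) (f : List α → β → List α)
    (h : ∀ s y, (f s y).length = s.length) (sal : List α) :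
    (l.foldl f sal).length = sal.length := by
  induction l generalizing sal with
  | nil => rfl
  | cons x xs ih => rw [List.foldl_cons, ih, h]

theorem pvInner_get (n : Nat) (c : Int → Prop) [DecidablePred c] (v : Int)
    (sal : List Int) (hn : n ≤ sal.length) (j : Nat) :
    ((PySem.List.pyRange 0 (n : Int) 1).foldl
        (fun s y => if c y then PySem.List.pySetD s y v else s) sal)[j]? =
      if j < n ∧ c (j : Int) then some v else sal[j]? := by
  induction n with
  | zero => simp [PySem.List.pyRange_one_eq_nil]
  | succ n ih =>
    have hr : PySem.List.pyRange 0 ((n : Int) + 1) 1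
        = PySem.List.pyRange 0 (n : Int) 1 ++ [(n : Int)] := by
      simpa using PySem.List.pyRange_one_succ_right (a := 0) (b := (n : Int)) (Int.natCast_nonneg n)
    have hcast : ((n + 1 : Nat) : Int) = (n : Int) + 1 := by push_cast; ring
    rw [hcast, hr, List.foldl_append]
    have hlen : ((PySem.List.pyRange 0 (n : Int) 1).foldl
        (fun s y => if c y then PySem.List.pySetD s y v else s) sal).length = sal.length := by
      apply pvFoldLen
      intro s y
      split
      · exact PySem.List.length_pySetD s y v
      · rfl
    simp only [List.foldl_cons, List.foldl_nil]
    by_cases hc : c (n : Int)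
    · rw [if_pos hc, PySem.List.pySetD_natCast, List.getElem?_set]
      by_cases hj : n = j
      · subst hj
        rw [if_pos rfl, hlen, if_pos (by omega), if_pos ⟨by omega, hc⟩]
      · rw [if_neg hj, ih (by omega)]
        by_cases hcj : c (j : Int)
        · by_cases hjn : j < n
          · rw [if_pos ⟨hjn, hcj⟩, if_pos ⟨by omega, hcj⟩]
          · rw [if_neg (fun h => hjn h.1), if_neg (fun h => absurd h.1 (by omega))]
        · rw [if_neg (fun h => hcj h.2), if_neg (fun h => hcj h.2)]
    · rw [if_neg hc, ih (by omega)]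
      by_cases hcj : c (j : Int)
      · by_cases hjn : j < n
        · rw [if_pos ⟨hjn, hcj⟩, if_pos ⟨by omega, hcj⟩]
        · have hne : ¬ (j < n + 1 ∧ c (j : Int)) := by
            rintro ⟨hlt, h2⟩
            have hjn' : j = n := by omega
            subst hjn'
            exact hc h2
          rw [if_neg (fun h => hjn h.1), if_neg hne]
      · rw [if_neg (fun h => hcj h.2), if_neg (fun h => hcj h.2)]

theorem pvOuter_get (n : Nat) (xs : List Int) (c : Int → Int → Prop)
    [inst : ∀ x y, Decidable (c x y)] (v : Int → Int) (sal : List Int)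
    (hn : n ≤ sal.length) (j : Nat) :
    (xs.foldl (fun sal x =>
        (PySem.List.pyRange 0 (n : Int) 1).foldl
          (fun s y => if c x y then PySem.List.pySetD s y (v x) else s) sal) sal)[j]? =
      match (xs.filter (fun x => decide (j < n ∧ c x (j : Int)))).getLast? with
      | some x => some (v x)
      | none => sal[j]? := by
  induction xs generalizing sal with
  | nil => simp
  | cons x xs ih =>
    rw [List.foldl_cons, List.filter_cons]
    have hlen : ((PySem.List.pyRange 0 (n : Int) 1).foldl
        (fun s y => if c x y then PySem.List.pySetD s y (v x) else s) sal).length = sal.length := by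
      apply pvFoldLen
      intro s y
      split
      · exact PySem.List.length_pySetD s y (v x)
      · rfl
    rw [ih _ (by omega)]
    by_cases hcx : j < n ∧ c x (j : Int)
    · rw [if_pos (by simpa using hcx)]
      cases hfe : xs.filter (fun x => decide (j < n ∧ c x (j : Int))) with
      | nil =>
        rw [pvInner_get n (c x) (v x) sal hn j, if_pos hcx]
        simp
      | cons y ys =>
        obtain ⟨z, hz⟩ := Option.isSome_iff_exists.mp
          (List.getLast?_isSome.mpr (by simp) : (y :: ys).getLast?.isSome)
        have : (x :: y :: ys).getLast? = some z := by
          rw [List.getLast?_cons_cons, hz]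
        rw [hz, this]
    · rw [if_neg (by simpa using hcx)]
      cases hfe : xs.filter (fun x => decide (j < n ∧ c x (j : Int))) with
      | nil =>
        rw [pvInner_get n (c x) (v x) sal hn j, if_neg hcx]
      | cons y ys => rfl

theorem pvBLoop_get (n : Nat) (w : Int → Int) (sal : List Int) (hn : n ≤ sal.length) (j : Nat) :
    ((PySem.List.pyRange 0 (n : Int) 1).foldl
        (fun s y => PySem.List.pySetD s y (w y)) sal)[j]? =
      if j < n then some (w (j : Int)) else sal[j]? := by
  induction n with
  | zero => simp [PySem.List.pyRange_one_eq_nil]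
  | succ n ih =>
    have hr : PySem.List.pyRange 0 ((n : Int) + 1) 1
        = PySem.List.pyRange 0 (n : Int) 1 ++ [(n : Int)] := by
      simpa using PySem.List.pyRange_one_succ_right (a := 0) (b := (n : Int)) (Int.natCast_nonneg n)
    have hcast : ((n + 1 : Nat) : Int) = (n : Int) + 1 := by push_cast; ring
    rw [hcast, hr, List.foldl_append]
    have hlen : ((PySem.List.pyRange 0 (n : Int) 1).foldl
        (fun s y => PySem.List.pySetD s y (w y)) sal).length = sal.length := by
      apply pvFoldLen
      intro s y
      exact PySem.List.length_pySetD s y (w y)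
    simp only [List.foldl_cons, List.foldl_nil]
    rw [PySem.List.pySetD_natCast, List.getElem?_set]
    by_cases hj : n = j
    · subst hj
      rw [if_pos rfl, hlen, if_pos (by omega), if_pos (by omega)]
    · rw [if_neg hj, ih (by omega)]
      by_cases hjn : j < n
      · rw [if_pos hjn, if_pos (by omega)]
      · rw [if_neg hjn, if_neg (by omega)]

theorem pvRank_getD (l : List (Int × Int)) (d : PySem.Dict Int Int) (k d0 : Int) :
    (l.foldl (fun d p => d.insert p.2 p.1) d).getD k d0 =
      match (l.filter (fun p => p.2 == k)).getLast? with
      | some p => p.1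
      | none => d.getD k d0 := by
  induction l generalizing d with
  | nil => rfl
  | cons p l ih =>
    rw [List.foldl_cons, List.filter_cons, ih]
    by_cases hp : p.2 = k
    · rw [if_pos (by simpa using hp)]
      cases hfe : l.filter (fun p => p.2 == k) with
      | nil =>
        rw [PySem.Dict.getD_insert, if_pos hp.symm]
        simp
      | cons y ys =>
        obtain ⟨z, hz⟩ := Option.isSome_iff_exists.mp
          (List.getLast?_isSome.mpr (by simp) : (y :: ys).getLast?.isSome)
        have : (p :: y :: ys).getLast? = some z := by
          rw [List.getLast?_cons_cons, hz]
        rw [hz, this]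
    · rw [if_neg (by simpa using hp)]
      cases hfe : l.filter (fun p => p.2 == k) with
      | nil =>
        rw [PySem.Dict.getD_insert, if_neg (fun h => hp h.symm)]
      | cons y ys => rfl

-- ===== VERDICT (by name: the statement is the Claim_ definition above) =====
theorem SynchronizingTables_spec : Claim_equal_SynchronizingTables := by
  intro N ids salary _ hpre
  obtain ⟨h1, h2⟩ := hpre
  unfold Spec_SynchronizingTables
  by_cases hN : N ≤ 0
  · simp [SynchronizingTables, SynchronizingTables_alt, PySem.List.pyRange_one_eq_nil hN]
  · replace hN : 0 < N := by omega
    set n := N.toNat with hndef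
    have hNn : ((n : Nat) : Int) = N := Int.toNat_of_nonneg (by omega)
    set p := ids.take n with hpdef
    set ps := salary.take n with hpsdef
    set q := PySem.List.sorted p (fun x => x) false with hqdef
    set qs := PySem.List.sorted ps (fun x => x) false with hqsdef
    have hni : n ≤ ids.length := by omega
    have hns : n ≤ salary.length := by omega
    have hplen : p.length = n := by rw [hpdef, List.length_take]; omega
    have hpslen : ps.length = n := by rw [hpsdef, List.length_take]; omega
    have hqlen : q.length = n := by rw [hqdef, PySem.List.length_sorted, hplen]
    have hqslen : qs.length = n := by rw [hqsdef, PySem.List.length_sorted, hpslen]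
    have hkk : (N - 1).toNat + 1 = n := by omega
    have hbid : pvBubbleA (N - 1).toNat ids = q ++ ids.drop n := by
      conv_lhs => rw [← List.take_append_drop n ids]
      exact pvBubbleA_split (pvInv p) _ p (ids.drop n) rfl (hplen.trans hkk.symm)
    have hbsal : pvBubbleA (N - 1).toNat salary = qs ++ salary.drop n := by
      conv_lhs => rw [← List.take_append_drop n salary]
      exact pvBubbleA_split (pvInv ps) _ ps (salary.drop n) rfl (hpslen.trans hkk.symm)
    have hsli : PySem.List.slice ids none (some N) = p := by
      rw [hpdef, hndef]
      exact PySem.List.slice_to ids (by omega)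
    have hsls : PySem.List.slice salary none (some N) = ps := by
      rw [hpsdef, hndef]
      exact PySem.List.slice_to salary (by omega)
    simp only [SynchronizingTables, SynchronizingTables_alt, hbid, hbsal, hsli, hsls]
    rw [← hqdef, ← hqsdef, ← hNn]
    have hqget : ∀ x : Int, 0 ≤ x → x < (n : Int) →
        PySem.List.pyGetD (q ++ ids.drop n) x 0 = PySem.List.pyGetD q x 0 := by
      intro x hx0 hxn
      rw [PySem.List.pyGetD_eq_getElem _ _ hx0
            (by rw [List.length_append, hqlen]; push_cast; omega),
          PySem.List.pyGetD_eq_getElem _ _ hx0 (by rw [hqlen]; omega)]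
      exact List.getElem_append_left (by rw [hqlen]; omega)
    have hqsget : ∀ x : Int, 0 ≤ x → x < (n : Int) →
        PySem.List.pyGetD (qs ++ salary.drop n) x 0 = PySem.List.pyGetD qs x 0 := by
      intro x hx0 hxn
      rw [PySem.List.pyGetD_eq_getElem _ _ hx0
            (by rw [List.length_append, hqslen]; push_cast; omega),
          PySem.List.pyGetD_eq_getElem _ _ hx0 (by rw [hqslen]; omega)]
      exact List.getElem_append_left (by rw [hqslen]; omega)
    apply List.ext_getElem?
    intro j
    rw [pvOuter_get n (PySem.List.pyRange 0 (n : Int) 1)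
        (fun x y => PySem.List.pyGetD (q ++ ids.drop n) x 0 = PySem.List.pyGetD ids y 0)
        (fun x => PySem.List.pyGetD (qs ++ salary.drop n) x 0) salary hns j]
    rw [pvBLoop_get n
        (fun y => PySem.List.pyGetD qs
          (((PySem.List.enumerate q 0).foldl (fun d p => d.insert p.2 p.1)
              PySem.Dict.empty).getD (PySem.List.pyGetD ids y 0) 0) 0) salary hns j]
    by_cases hj : j < n
    · set vj := PySem.List.pyGetD ids (j : Int) 0 with hvjdef
      have hvj : vj = ids[j]'(by omega) := by
        rw [hvjdef, PySem.List.pyGetD_eq_getElem ids 0 (Int.natCast_nonneg j)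
              (by omega)]
        simp
      have hfc : (PySem.List.pyRange 0 (n : Int) 1).filter
            (fun x => decide (j < n ∧ PySem.List.pyGetD (q ++ ids.drop n) x 0 = vj))
          = (PySem.List.pyRange 0 (n : Int) 1).filter
            (fun x => PySem.List.pyGetD q x 0 == vj) := by
        apply List.filter_congr
        intro x hx
        obtain ⟨hx0, hxn⟩ := PySem.List.mem_pyRange_one.mp hx
        rw [hqget x hx0 hxn]
        by_cases hv : PySem.List.pyGetD q x 0 = vj <;> simp [hj, hv]
      have hmemq : vj ∈ q := by
        rw [hqdef, PySem.List.mem_sorted]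
        rw [hvj]
        have hjp : j < p.length := by omega
        have hpe : p[j]'hjp = ids[j]'(by omega) := by
          simp only [hpdef]
          exact List.getElem_take
        rw [← hpe]
        exact List.getElem_mem hjp
      obtain ⟨i, hi, hqi⟩ := List.mem_iff_getElem.mp hmemq
      have hiF : (i : Int) ∈ (PySem.List.pyRange 0 (n : Int) 1).filter
          (fun x => PySem.List.pyGetD q x 0 == vj) := by
        rw [List.mem_filter]
        refine ⟨PySem.List.mem_pyRange_one.mpr
          ⟨Int.natCast_nonneg i, by rw [hqlen] at hi; exact_mod_cast hi⟩, ?_⟩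
        rw [PySem.List.pyGetD_eq_getElem q 0 (Int.natCast_nonneg i) (by exact_mod_cast hi)]
        simp [hqi]
      have hFne : (PySem.List.pyRange 0 (n : Int) 1).filter
          (fun x => PySem.List.pyGetD q x 0 == vj) ≠ [] := by
        intro hemp
        rw [hemp] at hiF
        simp at hiF
      obtain ⟨x, hx⟩ := Option.isSome_iff_exists.mp (List.getLast?_isSome.mpr hFne)
      have hxmem := List.mem_of_getLast? hx
      rw [List.mem_filter] at hxmem
      obtain ⟨hx0, hxn⟩ := PySem.List.mem_pyRange_one.mp hxmem.1
      have hrank : ((PySem.List.enumerate q 0).foldl (fun d p => d.insert p.2 p.1)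
          PySem.Dict.empty).getD vj 0 = x := by
        rw [pvRank_getD]
        rw [PySem.List.enumerate_eq_map_pyRange q 0]
        rw [List.filter_map, List.getLast?_map]
        simp only [Function.comp_def, PySem.List.len_eq, hqlen]
        rw [hx]
        rfl
      rw [if_pos hj, hfc, hx, hrank]
      show some (PySem.List.pyGetD (qs ++ salary.drop n) x 0) = some (PySem.List.pyGetD qs x 0)
      rw [hqsget x hx0 hxn]
    · rw [if_neg hj]
      rw [show (PySem.List.pyRange 0 (n : Int) 1).filter
            (fun x => decide (j < n ∧ PySem.List.pyGetD (q ++ ids.drop n) x 0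
              = PySem.List.pyGetD ids (j : Int) 0)) = [] from
          List.filter_eq_nil_iff.mpr (fun a _ => by simp [hj])]
      rfl
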